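-- pv_equiv track=rewrite | github.com/JosephOcasio/beyond-seo | aura-governance-hub/tools/cfmga.py | window_sums_words
-- ===== SOURCE A (Python) =====
-- from typing import Dict, List, Optional, Sequence, Tuple, Any, Iterable
--
-- def sum_word(word: str, mapping: Dict[str, int]) -> int:
--     return sum(mapping.get(ch, 0) for ch in word)
--
-- def window_sums_words(tokens: Sequence[str], mapping: Dict[str, int], window_size: int) -> List[int]:
--     """
--     Sliding word windows: sum gematria over all characters of words in the window.
--     """
--     if window_size <= 0:
--         raise ValueError("window_size must be positive")
--     if len(tokens) < window_size:
--         return []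
--     # Precompute per-word sums to accelerate
--     w_sums = [sum_word(w, mapping) for w in tokens]
--     out: List[int] = []
--     current = sum(w_sums[:window_size])
--     out.append(current)
--     for i in range(window_size, len(w_sums)):
--         current += w_sums[i] - w_sums[i - window_size]
--         out.append(current)
--     return out
-- ===== SOURCE B (Python) =====
-- from typing import Dict, List, Sequence
--
-- def sum_word(word: str, mapping: Dict[str, int]) -> int:
--     return sum(mapping.get(ch, 0) for ch in word)
--
-- def window_sums_words(tokens: Sequence[str], mapping: Dict[str, int], window_size: int) -> List[int]:
--     if window_size <= 0:
--         raise ValueError("window_size must be positive")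
--     if len(tokens) < window_size:
--         return []
--     w_sums = [sum_word(w, mapping) for w in tokens]
--     prefix = [0]
--     acc = 0
--     for s in w_sums:
--         acc += s
--         prefix.append(acc)
--     return [prefix[i + window_size] - prefix[i] for i in range(len(tokens) - window_size + 1)]
-- ===== Notes on version B (the rewrite author's own statement) =====
-- stated objective: alternative
-- what changed: Replaces the running-window accumulator loop (add the entering word's sum, subtract the leaving one) with a precomputed prefix-sum table; each window sum is obtained by a single subtraction of two prefix entries, with no per-step carry of loop state.
import Mathlib
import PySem

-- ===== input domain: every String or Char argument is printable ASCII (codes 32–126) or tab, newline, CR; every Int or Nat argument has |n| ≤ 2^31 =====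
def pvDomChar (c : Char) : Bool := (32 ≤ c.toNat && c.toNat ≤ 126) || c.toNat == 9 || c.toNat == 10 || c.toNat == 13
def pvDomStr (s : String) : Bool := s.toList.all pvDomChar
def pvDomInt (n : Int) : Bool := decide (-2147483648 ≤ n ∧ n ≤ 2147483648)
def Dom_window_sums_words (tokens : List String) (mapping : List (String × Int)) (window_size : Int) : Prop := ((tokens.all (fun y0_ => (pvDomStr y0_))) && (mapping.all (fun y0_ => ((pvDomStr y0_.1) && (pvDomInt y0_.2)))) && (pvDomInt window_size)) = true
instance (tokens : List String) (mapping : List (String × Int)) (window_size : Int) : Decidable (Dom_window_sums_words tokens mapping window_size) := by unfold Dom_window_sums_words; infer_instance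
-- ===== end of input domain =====

-- B replaces A's running-window accumulator with a prefix-sum table indexed by window endpoints (alternative decomposition, same cost).

-- ===== PORT A =====
-- sum_word(word, mapping): sum of mapping.get(ch, 0) over the characters of word (shared helper: both
-- Pythons define it with the identical body).
def pvSumWord (mapping : List (String × Int)) (w : String) : Int :=
  w.toList.foldl (fun acc c => acc + (PySem.Dict.mk mapping).getD (String.ofList [c]) 0) 0

def window_sums_words (tokens : List String) (mapping : List (String × Int)) (window_size : Int) : List Int :=
  if window_size ≤ 0 then []   -- Python raises ValueError here; excluded by Pre_
  else if (tokens.length : Int) < window_size then []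
  else
    let w_sums := tokens.map (pvSumWord mapping)
    let current := (PySem.List.slice w_sums (some 0) (some window_size)).sum
    let res := (PySem.List.pyRange window_size (w_sums.length : Int) 1).foldl
      (fun st i =>
        let c := st.1 + (PySem.List.pyGetD w_sums i 0 - PySem.List.pyGetD w_sums (i - window_size) 0)
        (c, st.2 ++ [c]))
      (current, [current])
    res.2

-- ===== PORT B =====
def window_sums_words_alt (tokens : List String) (mapping : List (String × Int)) (window_size : Int) : List Int :=
  if window_size ≤ 0 then []   -- Python raises ValueError here; excluded by Pre_
  else if (tokens.length : Int) < window_size then []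
  else
    let w_sums := tokens.map (pvSumWord mapping)
    let st := w_sums.foldl (fun st s => (st.1 + s, st.2 ++ [st.1 + s])) ((0 : Int), [(0 : Int)])
    let pre := st.2
    (PySem.List.pyRange 0 ((tokens.length : Int) - window_size + 1) 1).map
      (fun i => PySem.List.pyGetD pre (i + window_size) 0 - PySem.List.pyGetD pre i 0)

-- ===== PRECONDITION & SPEC =====
-- Pre_ excludes only window_size ≤ 0, where Python A raises ValueError (B raises identically).
def Pre_window_sums_words (tokens : List String) (mapping : List (String × Int)) (window_size : Int) : Prop :=
  0 < window_size
instance (tokens : List String) (mapping : List (String × Int)) (window_size : Int) : Decidable (Pre_window_sums_words tokens mapping window_size) := by unfold Pre_window_sums_words; infer_instance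

def pvWitness_window_sums_words : List String × (List (String × Int)) × Int := (["ab", "c"], [("a", 1), ("b", 2)], 1)

def Spec_window_sums_words (tokens : List String) (mapping : List (String × Int)) (window_size : Int) (out : List Int) : Prop := out = window_sums_words_alt tokens mapping window_size
instance (tokens : List String) (mapping : List (String × Int)) (window_size : Int) (out : List Int) : Decidable (Spec_window_sums_words tokens mapping window_size out) := by unfold Spec_window_sums_words; infer_instance

-- ===== CLAIM (what is proved, stated in full; the proofs are below) =====
def Claim_equal_window_sums_words : Prop := ∀ (tokens : List String) (mapping : List (String × Int)) (window_size : Int), Dom_window_sums_words tokens mapping window_size → Pre_window_sums_words tokens mapping window_size → Spec_window_sums_words tokens mapping window_size (window_sums_words tokens mapping window_size)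

-- ===== LEMMAS AND PROOFS =====

def pvP (ws : List Int) (j : Nat) : Int := (ws.take j).sum

theorem pvP_succ (ws : List Int) (j : Nat) (h : j < ws.length) :
    pvP ws (j + 1) = pvP ws j + ws.getD j 0 := by
  unfold pvP
  rw [List.take_add_one, List.sum_append, List.getD_eq_getElem?_getD, List.getElem?_eq_getElem h]
  simp

theorem pv_prefix_loop (ws : List Int) (a : Int) (l : List Int) :
    ws.foldl (fun st s => (st.1 + s, st.2 ++ [st.1 + s])) (a, l)
      = (a + ws.sum, l ++ (List.range ws.length).map (fun j => a + (ws.take (j + 1)).sum)) := by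
  induction ws generalizing a l with
  | nil => simp
  | cons x ws ih =>
    simp only [List.foldl_cons, ih, List.length_cons, List.range_succ_eq_map, List.map_cons,
      List.map_map, List.sum_cons, List.take_succ_cons, Prod.mk.injEq]
    refine ⟨by ring, ?_⟩
    rw [List.append_assoc, List.singleton_append]
    congr 1
    · simp
      intro j _
      ring

theorem pv_sliding_loop (ws : List Int) (k : Nat) (m : Nat) (hm : k + m ≤ ws.length) :
    ((List.range m).map (fun t : Nat => ((k : Int) + (t : Int)))).foldl
      (fun st i =>
        let c := st.1 + (PySem.List.pyGetD ws i 0 - PySem.List.pyGetD ws (i - (k : Int)) 0)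
        (c, st.2 ++ [c]))
      (pvP ws k, [pvP ws k])
    = (pvP ws (k + m) - pvP ws m,
       (List.range (m + 1)).map (fun j => pvP ws (j + k) - pvP ws j)) := by
  induction m with
  | zero => simp [pvP]
  | succ m ih =>
    have hm' : k + m ≤ ws.length := by omega
    rw [List.range_succ, List.map_append, List.foldl_append, ih hm']
    simp only [List.map_cons, List.map_nil, List.foldl_cons, List.foldl_nil]
    have h1 : ((k : Int) + (m : Int)) = ((k + m : Nat) : Int) := by push_cast; ring
    have h2 : ((k + m : Nat) : Int) - (k : Int) = ((m : Nat) : Int) := by push_cast; ring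
    rw [h1, h2, PySem.List.pyGetD_natCast, PySem.List.pyGetD_natCast]
    have hc : pvP ws (k + m) - pvP ws m + (ws.getD (k + m) 0 - ws.getD m 0)
        = pvP ws (k + (m + 1)) - pvP ws (m + 1) := by
      rw [show k + (m + 1) = (k + m) + 1 from rfl, pvP_succ ws (k + m) (by omega),
        pvP_succ ws m (by omega)]
      ring
    refine Prod.ext hc ?_
    rw [List.range_succ (n := m + 1), List.map_append]
    simp only [List.map_cons, List.map_nil]
    congr 1
    rw [hc]
    rw [Nat.add_comm (m+1) k]

theorem pv_prefix_eq (ws : List Int) :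
    (ws.foldl (fun st s => (st.1 + s, st.2 ++ [st.1 + s])) ((0 : Int), [(0 : Int)])).2
      = (List.range (ws.length + 1)).map (pvP ws) := by
  rw [pv_prefix_loop]
  simp [List.range_succ_eq_map, pvP, List.map_map, Function.comp]

-- ===== VERDICT (by name: the statement is the Claim_ definition above) =====
theorem window_sums_words_spec : Claim_equal_window_sums_words := by
  intro tokens mapping window_size _ hpre
  unfold Spec_window_sums_words
  have hpos : ¬ window_size ≤ 0 := by simpa [Pre_window_sums_words] using hpre
  simp only [window_sums_words, window_sums_words_alt, if_neg hpos]
  by_cases hlt : (tokens.length : Int) < window_size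
  · rw [if_pos hlt, if_pos hlt]
  · rw [if_neg hlt, if_neg hlt]
    set ws := tokens.map (pvSumWord mapping) with hws
    have hlen : ws.length = tokens.length := by simp [hws]
    obtain ⟨k, hk⟩ : ∃ k : Nat, window_size = (k : Int) := ⟨window_size.toNat, by omega⟩
    have hkn : k ≤ tokens.length := by omega
    -- A side: initial window sum and the loop's range
    have hcur : (PySem.List.slice ws (some 0) (some window_size)).sum = pvP ws k := by
      rw [hk]
      simp [pvP]
    have hrange : PySem.List.pyRange window_size (ws.length : Int) 1
        = (List.range (tokens.length - k)).map (fun t : Nat => ((k : Int) + (t : Int))) := by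
      have ht : ((tokens.length : Int) - (k : Int)).toNat = tokens.length - k := by omega
      rw [hk, hlen, PySem.List.pyRange_one, ht]
    rw [hcur, hrange, hk, pv_sliding_loop ws k (tokens.length - k) (by omega)]
    -- B side: the prefix table and the closing comprehension
    rw [pv_prefix_eq ws]
    have hm : (tokens.length : Int) - (k : Int) + 1 = ((tokens.length - k + 1 : Nat) : Int) := by
      push_cast [hkn]; ring
    rw [hm, PySem.List.pyRange_zero_nat, List.map_map]
    apply List.map_congr_left
    intro j hj
    simp only [List.mem_range] at hj
    simp only [Function.comp]
    have hjk : ((j : Nat) : Int) + ((k : Nat) : Int) = ((j + k : Nat) : Int) := by push_cast; ring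
    rw [hjk, PySem.List.pyGetD_natCast, PySem.List.pyGetD_natCast,
      List.getD_eq_getElem?_getD, List.getD_eq_getElem?_getD, List.getElem?_map, List.getElem?_map,
      List.getElem?_range (by omega : j + k < ws.length + 1),
      List.getElem?_range (by omega : j < ws.length + 1)]
    simp
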